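-- pv_equiv track=rewrite | github.com/AnarchyEnthusiast/lazarus-space | mts_to_lua.py | format_lua_structure
-- ===== SOURCE A (Python) =====
-- def group_by_layer(entries):
--     """Group entries by y-coordinate for readable output."""
--     layers = {}
--     for dx, dy, dz, alias in entries:
--         if dy not in layers:
--             layers[dy] = []
--         layers[dy].append((dx, dy, dz, alias))
--
--     # Sort each layer by z then x
--     for dy in layers:
--         layers[dy].sort(key=lambda e: (e[2], e[0]))
--
--     return layers
--
-- def format_lua_structure(entries, tier_num):
--     """Format entries as Lua S() calls grouped by layer."""
--     layers = group_by_layer(entries)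
--     lines = []
--
--     layer_names = {}
--     ys = sorted(layers.keys())
--     if len(ys) == 5:
--         layer_names[ys[0]] = "FLOOR"
--         layer_names[ys[1]] = "WALL (lower)"
--         layer_names[ys[2]] = "MIDDLE"
--         layer_names[ys[3]] = "WALL (upper)"
--         layer_names[ys[4]] = "ROOF"
--
--     for dy in ys:
--         name = layer_names.get(dy, f"y={dy}")
--         lines.append(f"-- ---- Tier {tier_num}: {name} (y = {dy}) ----")
--         for dx, _, dz, alias in layers[dy]:
--             lines.append(f"S({dx:3d},{dy:2d},{dz:3d}, {alias})")
--         lines.append("")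
--
--     return "\n".join(lines)
-- ===== SOURCE B (Python) =====
-- def format_lua_structure(entries, tier_num):
--     """Format entries as Lua S() calls grouped by layer.
--
--     Simpler: one global stable sort (copy) by (dz, dx) then by dy replaces the
--     dict-of-buckets; layers are read off the sorted list, names positionally."""
--     s = sorted(sorted(entries, key=lambda e: (e[2], e[0])), key=lambda e: e[1])
--     ys = list(dict.fromkeys(e[1] for e in s))
--     lines = []
--     for i, y in enumerate(ys):
--         name = ("FLOOR", "WALL (lower)", "MIDDLE", "WALL (upper)", "ROOF")[i] if len(ys) == 5 else f"y={y}"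
--         lines.append(f"-- ---- Tier {tier_num}: {name} (y = {y}) ----")
--         for dx, dy, dz, alias in s:
--             if dy == y:
--                 lines.append(f"S({dx:3d},{dy:2d},{dz:3d}, {alias})")
--         lines.append("")
--     return "\n".join(lines)
-- ===== Notes on version B (the rewrite author's own statement) =====
-- stated objective: simpler
-- what changed: Replaced the dict-of-buckets (group by dy, then sort each bucket) with one global stable double sort of a copy plus an ordered-dedup of dy values; layer names are assigned positionally instead of via a lookup dict.
import Mathlib
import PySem

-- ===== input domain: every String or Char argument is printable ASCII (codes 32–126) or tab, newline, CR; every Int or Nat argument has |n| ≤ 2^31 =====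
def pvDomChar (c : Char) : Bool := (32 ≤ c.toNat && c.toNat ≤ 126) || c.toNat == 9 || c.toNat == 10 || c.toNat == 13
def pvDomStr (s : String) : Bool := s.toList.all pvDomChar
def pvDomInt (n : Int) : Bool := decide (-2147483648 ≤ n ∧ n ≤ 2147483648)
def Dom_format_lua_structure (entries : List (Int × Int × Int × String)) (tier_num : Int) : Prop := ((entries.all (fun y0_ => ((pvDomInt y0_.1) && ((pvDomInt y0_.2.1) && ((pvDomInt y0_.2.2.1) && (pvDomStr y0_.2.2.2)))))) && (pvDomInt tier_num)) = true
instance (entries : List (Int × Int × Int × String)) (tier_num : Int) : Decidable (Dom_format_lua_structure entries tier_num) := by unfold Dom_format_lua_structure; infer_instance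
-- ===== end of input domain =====

-- B replaces A's dict-of-buckets + per-bucket sort by one global stable double sort of a copy
-- plus an ordered dedup of the y values, with positional layer names (objective: simpler).
-- Both Pythons only sort internal copies; neither mutates the caller's list.

-- shared formatting helpers: both Pythons build lines with the identical f-strings
-- f"{n:Wd}" (right-align in width W with spaces; exact for int n)
def pvPad (w : Nat) (n : Int) : List Char :=
  List.replicate (w - (PySem.Int.toChars n).length) ' ' ++ PySem.Int.toChars n

-- f"-- ---- Tier {tier_num}: {name} (y = {dy}) ----"
def pvHeader (tier_num : Int) (name : List Char) (y : Int) : String :=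
  String.ofList ("-- ---- Tier ".toList ++ PySem.Int.toChars tier_num ++ ": ".toList ++ name
    ++ " (y = ".toList ++ PySem.Int.toChars y ++ ") ----".toList)

-- f"S({dx:3d},{dy:2d},{dz:3d}, {alias})"
def pvS (dx y dz : Int) (nm : String) : String :=
  String.ofList ("S(".toList ++ pvPad 3 dx ++ [','] ++ pvPad 2 y ++ [','] ++ pvPad 3 dz
    ++ ", ".toList ++ nm.toList ++ [')'])

-- ===== PORT A =====
def format_lua_structure (entries : List (Int × Int × Int × String)) (tier_num : Int) : String :=
  -- group_by_layer: dict of buckets in first-seen key order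
  let layers0 : PySem.Dict Int (List (Int × Int × Int × String)) :=
    entries.foldl (fun d e =>
      let d := if d.contains e.2.1 then d else d.insert e.2.1 []
      d.modify e.2.1 [] (fun l => l ++ [e])) PySem.Dict.empty
  -- for dy in layers: layers[dy].sort(key=lambda e: (e[2], e[0]))
  let layers := layers0.keys.foldl
    (fun d y => d.modify y [] (fun l => PySem.List.sorted2 l (fun e => e.2.2.1) (fun e => e.1))) layers0
  let ys := PySem.List.sorted layers.keys (fun y => y)
  let layer_names : PySem.Dict Int (List Char) :=
    if ys.length = 5 then
      ((((PySem.Dict.empty.insert (PySem.List.pyGetD ys 0 0) "FLOOR".toList).insert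
          (PySem.List.pyGetD ys 1 0) "WALL (lower)".toList).insert
          (PySem.List.pyGetD ys 2 0) "MIDDLE".toList).insert
          (PySem.List.pyGetD ys 3 0) "WALL (upper)".toList).insert
          (PySem.List.pyGetD ys 4 0) "ROOF".toList
    else PySem.Dict.empty
  let lines := ys.foldl (fun lines y =>
    let name := layer_names.getD y ("y=".toList ++ PySem.Int.toChars y)
    let lines := lines ++ [pvHeader tier_num name y]
    -- layers[dy]: y is drawn from layers' keys, so the key is present (no KeyError)
    let lines := (layers.getD y []).foldl (fun lines e => lines ++ [pvS e.1 y e.2.2.1 e.2.2.2]) lines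
    lines ++ [""]) []
  PySem.Str.join "\n" lines

-- ===== PORT B =====
def format_lua_structure_alt (entries : List (Int × Int × Int × String)) (tier_num : Int) : String :=
  let s := PySem.List.sorted
    (PySem.List.sorted2 entries (fun e => e.2.2.1) (fun e => e.1)) (fun e => e.2.1)
  let ys := PySem.List.dedup (s.map (fun e => e.2.1))
  let lines := (PySem.List.enumerate ys).foldl (fun lines iy =>
    let name := if ys.length = 5 then
        PySem.List.pyGetD ["FLOOR".toList, "WALL (lower)".toList, "MIDDLE".toList,
          "WALL (upper)".toList, "ROOF".toList] iy.1 []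
      else "y=".toList ++ PySem.Int.toChars iy.2
    let lines := lines ++ [pvHeader tier_num name iy.2]
    let lines := s.foldl (fun lines e =>
      if e.2.1 == iy.2 then lines ++ [pvS e.1 e.2.1 e.2.2.1 e.2.2.2] else lines) lines
    lines ++ [""]) []
  PySem.Str.join "\n" lines

-- ===== PRECONDITION & SPEC =====
def Spec_format_lua_structure (entries : List (Int × Int × Int × String)) (tier_num : Int) (out : String) : Prop := out = format_lua_structure_alt entries tier_num
instance (entries : List (Int × Int × Int × String)) (tier_num : Int) (out : String) : Decidable (Spec_format_lua_structure entries tier_num out) := by unfold Spec_format_lua_structure; infer_instance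

-- ===== CLAIM (what is proved, stated in full; the proofs are below) =====
def Claim_equal_format_lua_structure : Prop := ∀ (entries : List (Int × Int × Int × String)) (tier_num : Int), Dom_format_lua_structure entries tier_num → Spec_format_lua_structure entries tier_num (format_lua_structure entries tier_num)

-- ===== LEMMAS AND PROOFS =====

theorem pv_insertBy_pairwise {α : Type} (lt : α → α → Bool)
    (Hasym : ∀ a b, lt a b = true → lt b a = false)
    (Htrans : ∀ a b c, lt a b = true → lt b c = true → lt a c = true)
    (x : α) (acc : List α) (h : acc.Pairwise (fun a b => lt b a = false)) :
    (PySem.List.insertBy lt x acc).Pairwise (fun a b => lt b a = false) := by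
  induction acc with
  | nil => simp [PySem.List.insertBy]
  | cons y ys ih =>
    rcases List.pairwise_cons.mp h with ⟨hy, hys⟩
    by_cases hxy : lt x y = true
    · simp only [PySem.List.insertBy, hxy, if_true]
      refine List.pairwise_cons.mpr ⟨?_, h⟩
      intro w hw
      rcases List.mem_cons.mp hw with rfl | hw
      · exact Hasym x w hxy
      · by_contra hwx
        have hwx' : lt w x = true := by
          cases hcb : lt w x
          · exact absurd hcb hwx
          · rfl
        exact absurd (Htrans w x y hwx' hxy) (by simp [hy w hw])
    · simp only [PySem.List.insertBy, hxy, if_false]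
      refine List.pairwise_cons.mpr ⟨?_, ih hys⟩
      intro w hw
      rcases (PySem.List.mem_insertBy lt x w ys).mp hw with rfl | hw
      · exact Bool.eq_false_iff.mpr hxy
      · exact hy w hw

theorem pv_filter_insertBy {α : Type} (lt : α → α → Bool) (p : α → Bool)
    (Hneg : ∀ a b c, lt a b = true → lt c b = false → lt a c = true)
    (x : α) (acc : List α) (h : acc.Pairwise (fun a b => lt b a = false)) :
    (PySem.List.insertBy lt x acc).filter p
      = if p x then PySem.List.insertBy lt x (acc.filter p) else acc.filter p := by
  induction acc with
  | nil => by_cases hx : p x = true <;> simp [PySem.List.insertBy, List.filter_cons, hx]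
  | cons y ys ih =>
    rcases List.pairwise_cons.mp h with ⟨hy, hys⟩
    by_cases hxy : lt x y = true
    · simp only [PySem.List.insertBy, hxy, if_true]
      by_cases hx : p x = true
      · by_cases hpy : p y = true
        · simp [List.filter_cons, hx, hpy, PySem.List.insertBy, hxy]
        · simp only [List.filter_cons, hx, hpy, if_true, if_false]
          cases hf : ys.filter p with
          | nil => simp [PySem.List.insertBy]
          | cons z zs =>
            have hz : z ∈ ys := List.mem_of_mem_filter (hf ▸ List.mem_cons_self)
            have hxz : lt x z = true := Hneg x y z hxy (hy z hz)
            simp [PySem.List.insertBy, hxz]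
      · simp [List.filter_cons, hx]
    · simp only [PySem.List.insertBy, hxy, if_false]
      by_cases hx : p x = true
      · by_cases hpy : p y = true
        · simp [List.filter_cons, hpy, ih hys, hx, PySem.List.insertBy, hxy]
        · simp [List.filter_cons, hpy, ih hys, hx]
      · by_cases hpy : p y = true
        · simp [List.filter_cons, hpy, ih hys, hx]
        · simp [List.filter_cons, hpy, ih hys, hx]

theorem pv_genSort_spec {α : Type} (lt : α → α → Bool)
    (Hasym : ∀ a b, lt a b = true → lt b a = false)
    (Htrans : ∀ a b c, lt a b = true → lt b c = true → lt a c = true)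
    (Hneg : ∀ a b c, lt a b = true → lt c b = false → lt a c = true)
    (xs : List α) :
    (xs.foldl (fun acc x => PySem.List.insertBy lt x acc) []).Pairwise (fun a b => lt b a = false)
    ∧ ∀ p : α → Bool,
      (xs.foldl (fun acc x => PySem.List.insertBy lt x acc) []).filter p
        = (xs.filter p).foldl (fun acc x => PySem.List.insertBy lt x acc) [] := by
  induction xs using List.reverseRecOn with
  | nil => simp
  | append_singleton xs x ih =>
    rcases ih with ⟨hpw, hf⟩
    constructor
    · simp only [List.foldl_append, List.foldl_cons, List.foldl_nil]
      exact pv_insertBy_pairwise lt Hasym Htrans x _ hpw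
    · intro p
      simp only [List.foldl_append, List.foldl_cons, List.foldl_nil, List.filter_append]
      rw [pv_filter_insertBy lt p Hneg x _ hpw]
      by_cases hx : p x = true
      · simp [hx, List.filter_cons, hf p, List.foldl_append]
      · simp [hx, List.filter_cons, hf p]

theorem pv_filter_sorted {α : Type} (xs : List α) (key : α → Int) (p : α → Bool) :
    (PySem.List.sorted xs key).filter p = PySem.List.sorted (xs.filter p) key := by
  rw [PySem.List.sorted_eq_foldl_insertBy, PySem.List.sorted_eq_foldl_insertBy]
  exact (pv_genSort_spec _
    (by intro a b h; simp_all; omega)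
    (by intro a b c h1 h2; simp_all; omega)
    (by intro a b c h1 h2; simp_all; omega) xs).2 p

theorem pv_sorted2_eq_foldl (xs : List (Int × Int × Int × String)) :
    PySem.List.sorted2 xs (fun e => e.2.2.1) (fun e => e.1)
      = xs.foldl (fun acc x => PySem.List.insertBy
          (fun a b => decide (a.2.2.1 < b.2.2.1) || (!decide (b.2.2.1 < a.2.2.1) && decide (a.1 < b.1))) x acc) [] := rfl

theorem pv_filter_sorted2 (xs : List (Int × Int × Int × String)) (p : (Int × Int × Int × String) → Bool) :
    (PySem.List.sorted2 xs (fun e => e.2.2.1) (fun e => e.1)).filter p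
      = PySem.List.sorted2 (xs.filter p) (fun e => e.2.2.1) (fun e => e.1) := by
  rw [pv_sorted2_eq_foldl, pv_sorted2_eq_foldl]
  exact (pv_genSort_spec _
    (by intro a b h; simp_all; omega)
    (by intro a b c h1 h2; simp_all; omega)
    (by intro a b c h1 h2; simp_all; omega) xs).2 p

theorem pv_sLayer (entries : List (Int × Int × Int × String)) (y : Int) :
    (PySem.List.sorted (PySem.List.sorted2 entries (fun e => e.2.2.1) (fun e => e.1))
        (fun e => e.2.1)).filter (fun e => e.2.1 == y)
      = PySem.List.sorted2 (entries.filter (fun e => e.2.1 == y))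
          (fun e => e.2.2.1) (fun e => e.1) := by
  rw [pv_filter_sorted, pv_filter_sorted2]
  apply PySem.List.sorted_eq_self_of_pairwise
  apply List.pairwise_of_forall_mem_list
  intro a ha b hb
  have ha' := (PySem.List.sorted2_perm _ _ _ _).mem_iff.mp ha
  have hb' := (PySem.List.sorted2_perm _ _ _ _).mem_iff.mp hb
  have h1 : a.2.1 = y := by simpa using (List.mem_filter.mp ha').2
  have h2 : b.2.1 = y := by simpa using (List.mem_filter.mp hb').2
  simp [h1, h2]

theorem pv_ofList_sublist {α : Type} [BEq α] [LawfulBEq α] (xs : List α) :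
    (PySem.Set.ofList xs).Sublist xs := by
  induction xs using List.reverseRecOn with
  | nil => simp [PySem.Set.ofList]
  | append_singleton xs x ih =>
    rw [PySem.Set.ofList_append_singleton, PySem.Set.add_eq_ite]
    by_cases hx : x ∈ PySem.Set.ofList xs
    · simpa [hx] using ih.trans (List.sublist_append_left xs [x])
    · simpa [hx] using List.Sublist.append ih (List.Sublist.refl [x])

theorem pv_build_getD (es : List (Int × Int × Int × String))
    (d : PySem.Dict Int (List (Int × Int × Int × String))) (y : Int) :
    (es.foldl (fun d e =>
        (if d.contains e.2.1 then d else d.insert e.2.1 []).modify e.2.1 [] (fun l => l ++ [e])) d).getD y []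
      = d.getD y [] ++ es.filter (fun e => e.2.1 == y) := by
  induction es generalizing d with
  | nil => simp
  | cons e es ih =>
    rw [List.foldl_cons, ih, List.filter_cons]
    by_cases hc : d.contains e.2.1 = true
    · simp only [hc, if_true]
      rw [PySem.Dict.getD_modify]
      by_cases hy : e.2.1 = y
      · subst hy; simp
      · simp [hy, Ne.symm hy]
    · simp only [hc, Bool.false_eq_true, if_false, Bool.not_eq_true]
      rw [PySem.Dict.getD_modify]
      by_cases hy : e.2.1 = y
      · subst hy
        simp [PySem.Dict.getD_insert, PySem.Dict.getD_of_not_contains d _ (by simpa using hc)]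
      · simp [hy, Ne.symm hy, PySem.Dict.getD_insert]

theorem pv_step_keys (d : PySem.Dict Int (List (Int × Int × Int × String)))
    (e : Int × Int × Int × String) :
    ((if d.contains e.2.1 then d else d.insert e.2.1 []).modify e.2.1 [] (fun l => l ++ [e])).keys
      = PySem.Set.add d.keys e.2.1 := by
  by_cases hc : d.contains e.2.1 = true
  · have hm : e.2.1 ∈ d.keys := (PySem.Dict.contains_iff_mem_keys d _).mp hc
    simp only [hc, if_true]
    rw [PySem.Dict.keys_modify, PySem.Dict.keys_insert_of_contains _ _ hc, PySem.Set.add_of_mem hm]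
  · have hm : e.2.1 ∉ d.keys := fun h => hc ((PySem.Dict.contains_iff_mem_keys d _).mpr h)
    simp only [hc, Bool.false_eq_true, if_false, Bool.not_eq_true]
    rw [PySem.Dict.keys_modify,
        PySem.Dict.keys_insert_of_contains _ _ (PySem.Dict.contains_insert_self _ _ _),
        PySem.Dict.keys_insert_of_not_contains _ _ (by simpa using hc),
        PySem.Set.add_of_not_mem hm]

theorem pv_build_keys (es : List (Int × Int × Int × String))
    (d : PySem.Dict Int (List (Int × Int × Int × String))) :
    (es.foldl (fun d e =>
        (if d.contains e.2.1 then d else d.insert e.2.1 []).modify e.2.1 [] (fun l => l ++ [e])) d).keys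
      = PySem.Set.update d.keys (es.map (fun e => e.2.1)) := by
  induction es generalizing d with
  | nil => simp [PySem.Set.update]
  | cons e es ih =>
    rw [List.foldl_cons, ih, List.map_cons, PySem.Set.update_cons, pv_step_keys]

theorem pv_sortloop_getD {ν : Type} (f : List ν → List ν) (ks : List Int) (hk : ks.Nodup)
    (d : PySem.Dict Int (List ν)) (y : Int) :
    (ks.foldl (fun d y => d.modify y [] f) d).getD y []
      = if y ∈ ks then f (d.getD y []) else d.getD y [] := by
  induction ks generalizing d with
  | nil => simp
  | cons k ks ih =>
    rcases List.nodup_cons.mp hk with ⟨hknot, hnd⟩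
    rw [List.foldl_cons, ih hnd]
    by_cases hy : y ∈ ks
    · have hyk : y ≠ k := fun h => hknot (h ▸ hy)
      simp [hy, hyk, PySem.Dict.getD_modify]
    · by_cases hyk : y = k
      · subst hyk; simp [hy, PySem.Dict.getD_modify]
      · simp [hy, hyk, PySem.Dict.getD_modify]

theorem pv_sortloop_keys {ν : Type} (f : List ν → List ν) (ks : List Int)
    (d : PySem.Dict Int (List ν)) (hk : ∀ y ∈ ks, d.contains y = true) :
    (ks.foldl (fun d y => d.modify y [] f) d).keys = d.keys := by
  induction ks generalizing d with
  | nil => simp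
  | cons k ks ih =>
    have hck : d.contains k = true := hk k (List.mem_cons_self)
    have hkeys : (d.modify k [] f).keys = d.keys := by
      rw [PySem.Dict.keys_modify, PySem.Dict.keys_insert_of_contains _ _ hck]
    rw [List.foldl_cons, ih _ ?_, hkeys]
    intro y hy
    rw [PySem.Dict.contains_iff_mem_keys, hkeys, ← PySem.Dict.contains_iff_mem_keys]
    exact hk y (List.mem_cons_of_mem _ hy)
-- distinct y values of B's sorted list, in order: strictly increasing
theorem pv_Y_pairwise (entries : List (Int × Int × Int × String)) :
    (PySem.List.dedup ((PySem.List.sorted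
        (PySem.List.sorted2 entries (fun e => e.2.2.1) (fun e => e.1)) (fun e => e.2.1)).map
        (fun e => e.2.1))).Pairwise (fun a b => a < b) := by
  have hle : ((PySem.List.sorted
      (PySem.List.sorted2 entries (fun e => e.2.2.1) (fun e => e.1)) (fun e => e.2.1)).map
      (fun e => e.2.1)).Pairwise (fun a b => a ≤ b) :=
    PySem.List.sorted_map_key_pairwise _ _
  have hsub := pv_ofList_sublist ((PySem.List.sorted
      (PySem.List.sorted2 entries (fun e => e.2.2.1) (fun e => e.1)) (fun e => e.2.1)).map
      (fun e => e.2.1))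
  have hle' := hle.sublist hsub
  have hne : (PySem.List.dedup ((PySem.List.sorted
      (PySem.List.sorted2 entries (fun e => e.2.2.1) (fun e => e.1)) (fun e => e.2.1)).map
      (fun e => e.2.1))).Pairwise (fun a b => a ≠ b) := PySem.Set.nodup_ofList _
  exact (hle'.and hne).imp (fun h => lt_of_le_of_ne h.1 h.2)

-- A's sorted key list equals B's ordered dedup of the globally sorted list
theorem pv_ys_eq (entries : List (Int × Int × Int × String)) :
    PySem.List.sorted (PySem.Set.ofList (entries.map (fun e => e.2.1))) (fun y => y)
      = PySem.List.dedup ((PySem.List.sorted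
          (PySem.List.sorted2 entries (fun e => e.2.2.1) (fun e => e.1)) (fun e => e.2.1)).map
          (fun e => e.2.1)) := by
  apply PySem.List.sorted_eq_of_perm_of_pairwise_lt
  · apply (List.perm_ext_iff_of_nodup (PySem.Set.nodup_ofList _) (PySem.Set.nodup_ofList _)).mpr
    intro a
    simp only [PySem.Set.mem_ofList]
    exact (((PySem.List.sorted_perm _ _ _).trans (PySem.List.sorted2_perm _ _ _ _)).map _).mem_iff
  · exact pv_Y_pairwise entries

-- flatMap over enumerate with an index-independent function
theorem pv_flatMap_enumerate_snd {α β : Type} (g : α → List β) (xs : List α) (s : Int) :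
    (PySem.List.enumerate xs s).flatMap (fun iy => g iy.2) = xs.flatMap g := by
  induction xs generalizing s with
  | nil => simp [PySem.List.enumerate_nil]
  | cons x xs ih => rw [PySem.List.enumerate_cons]; simp [ih]

-- canonical pieces of both ports (proof-only definitions)
def pvY (entries : List (Int × Int × Int × String)) : List Int :=
  PySem.List.dedup ((PySem.List.sorted
    (PySem.List.sorted2 entries (fun e => e.2.2.1) (fun e => e.1)) (fun e => e.2.1)).map
    (fun e => e.2.1))

def pvBlock (tier_num : Int) (name : List Char) (y : Int)
    (entries : List (Int × Int × Int × String)) : List String :=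
  pvHeader tier_num name y ::
    ((PySem.List.sorted2 (entries.filter (fun e => e.2.1 == y)) (fun e => e.2.2.1)
        (fun e => e.1)).map (fun e => pvS e.1 y e.2.2.1 e.2.2.2) ++ [""])

theorem pv_mem_Y (entries : List (Int × Int × Int × String)) (y : Int) :
    y ∈ pvY entries ↔ y ∈ PySem.Set.ofList (entries.map (fun e => e.2.1)) := by
  unfold pvY
  simp only [PySem.List.dedup]
  rw [PySem.Set.mem_ofList, PySem.Set.mem_ofList]
  exact (((PySem.List.sorted_perm _ _ _).trans (PySem.List.sorted2_perm _ _ _ _)).map _).mem_iff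

theorem pv_A_canon (entries : List (Int × Int × Int × String)) (tier_num : Int) :
    format_lua_structure entries tier_num
      = PySem.Str.join "\n" ((pvY entries).flatMap (fun y =>
          pvBlock tier_num
            ((if (pvY entries).length = 5 then
                ((((PySem.Dict.empty.insert (PySem.List.pyGetD (pvY entries) 0 0) "FLOOR".toList).insert
                    (PySem.List.pyGetD (pvY entries) 1 0) "WALL (lower)".toList).insert
                    (PySem.List.pyGetD (pvY entries) 2 0) "MIDDLE".toList).insert
                    (PySem.List.pyGetD (pvY entries) 3 0) "WALL (upper)".toList).insert
                    (PySem.List.pyGetD (pvY entries) 4 0) "ROOF".toList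
              else PySem.Dict.empty).getD y ("y=".toList ++ PySem.Int.toChars y))
            y entries)) := by
  simp only [format_lua_structure]
  have hkeys0 : (entries.foldl (fun d e =>
      (if d.contains e.2.1 then d else d.insert e.2.1 []).modify e.2.1 [] (fun l => l ++ [e]))
        PySem.Dict.empty).keys = PySem.Set.ofList (entries.map (fun e => e.2.1)) := by
    rw [pv_build_keys]
    rfl
  have hnd : (entries.foldl (fun d e =>
      (if d.contains e.2.1 then d else d.insert e.2.1 []).modify e.2.1 [] (fun l => l ++ [e]))
        PySem.Dict.empty).keys.Nodup := hkeys0 ▸ PySem.Set.nodup_ofList _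
  have hslk : ((entries.foldl (fun d e =>
      (if d.contains e.2.1 then d else d.insert e.2.1 []).modify e.2.1 [] (fun l => l ++ [e]))
        PySem.Dict.empty).keys.foldl
      (fun d y => d.modify y [] (fun l => PySem.List.sorted2 l (fun e => e.2.2.1) (fun e => e.1)))
      (entries.foldl (fun d e =>
        (if d.contains e.2.1 then d else d.insert e.2.1 []).modify e.2.1 [] (fun l => l ++ [e]))
          PySem.Dict.empty)).keys
      = (entries.foldl (fun d e =>
        (if d.contains e.2.1 then d else d.insert e.2.1 []).modify e.2.1 [] (fun l => l ++ [e]))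
          PySem.Dict.empty).keys :=
    pv_sortloop_keys _ _ _ (fun y hy => (PySem.Dict.contains_iff_mem_keys _ _).mpr hy)
  have hys : PySem.List.sorted ((entries.foldl (fun d e =>
      (if d.contains e.2.1 then d else d.insert e.2.1 []).modify e.2.1 [] (fun l => l ++ [e]))
        PySem.Dict.empty).keys.foldl
      (fun d y => d.modify y [] (fun l => PySem.List.sorted2 l (fun e => e.2.2.1) (fun e => e.1)))
      (entries.foldl (fun d e =>
        (if d.contains e.2.1 then d else d.insert e.2.1 []).modify e.2.1 [] (fun l => l ++ [e]))
          PySem.Dict.empty)).keys (fun y => y) = pvY entries := by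
    rw [hslk, hkeys0]; unfold pvY; exact pv_ys_eq entries
  rw [hys]
  refine congrArg (PySem.Str.join "\n") (Eq.trans (PySem.List.foldl_congr_mem
    (g := fun acc y => acc ++ pvBlock tier_num
      ((if (pvY entries).length = 5 then
          ((((PySem.Dict.empty.insert (PySem.List.pyGetD (pvY entries) 0 0) "FLOOR".toList).insert
              (PySem.List.pyGetD (pvY entries) 1 0) "WALL (lower)".toList).insert
              (PySem.List.pyGetD (pvY entries) 2 0) "MIDDLE".toList).insert
              (PySem.List.pyGetD (pvY entries) 3 0) "WALL (upper)".toList).insert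
              (PySem.List.pyGetD (pvY entries) 4 0) "ROOF".toList
        else PySem.Dict.empty).getD y ("y=".toList ++ PySem.Int.toChars y))
      y entries) _ _ _ ?_) ?_)
  · intro acc y hy
    have hmem : y ∈ (entries.foldl (fun d e =>
        (if d.contains e.2.1 then d else d.insert e.2.1 []).modify e.2.1 [] (fun l => l ++ [e]))
          PySem.Dict.empty).keys := by
      rw [hkeys0]; exact (pv_mem_Y entries y).mp hy
    rw [pv_sortloop_getD _ _ hnd, if_pos hmem, pv_build_getD, PySem.Dict.getD_empty,
        List.nil_append, PySem.List.foldl_append_singleton_eq_map]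
    unfold pvBlock
    simp [List.append_assoc]
  · rw [PySem.List.foldl_append_eq_flatMap, List.nil_append]

theorem pvY_def (entries : List (Int × Int × Int × String)) :
    pvY entries = PySem.List.dedup ((PySem.List.sorted
      (PySem.List.sorted2 entries (fun e => e.2.2.1) (fun e => e.1)) (fun e => e.2.1)).map
      (fun e => e.2.1)) := rfl

theorem pv_B_canon (entries : List (Int × Int × Int × String)) (tier_num : Int) :
    format_lua_structure_alt entries tier_num
      = PySem.Str.join "\n" ((PySem.List.enumerate (pvY entries)).flatMap (fun iy =>
          pvBlock tier_num
            (if (pvY entries).length = 5 then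
                PySem.List.pyGetD ["FLOOR".toList, "WALL (lower)".toList, "MIDDLE".toList,
                  "WALL (upper)".toList, "ROOF".toList] iy.1 []
              else "y=".toList ++ PySem.Int.toChars iy.2)
            iy.2 entries)) := by
  simp only [format_lua_structure_alt]
  rw [← pvY_def]
  refine congrArg (PySem.Str.join "\n") (Eq.trans (PySem.List.foldl_congr_mem
    (g := fun acc iy => acc ++ pvBlock tier_num
      (if (pvY entries).length = 5 then
          PySem.List.pyGetD ["FLOOR".toList, "WALL (lower)".toList, "MIDDLE".toList,
            "WALL (upper)".toList, "ROOF".toList] iy.1 []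
        else "y=".toList ++ PySem.Int.toChars iy.2)
      iy.2 entries) _ _ _ ?_) ?_)
  · intro acc iy hiy
    rw [PySem.List.foldl_append_if]
    rw [List.map_congr_left (g := fun e => pvS e.1 iy.2 e.2.2.1 e.2.2.2) ?_]
    · rw [pv_sLayer entries iy.2]
      unfold pvBlock
      simp [List.append_assoc]
    · intro e he
      have : (e.2.1 == iy.2) = true := (List.mem_filter.mp he).2
      rw [show e.2.1 = iy.2 from by simpa using this]
  · rw [PySem.List.foldl_append_eq_flatMap, List.nil_append]

set_option maxHeartbeats 2000000 in
theorem pv_final (entries : List (Int × Int × Int × String)) (tier_num : Int) :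
    ((pvY entries).flatMap (fun y =>
        pvBlock tier_num
          ((if (pvY entries).length = 5 then
              ((((PySem.Dict.empty.insert (PySem.List.pyGetD (pvY entries) 0 0) "FLOOR".toList).insert
                  (PySem.List.pyGetD (pvY entries) 1 0) "WALL (lower)".toList).insert
                  (PySem.List.pyGetD (pvY entries) 2 0) "MIDDLE".toList).insert
                  (PySem.List.pyGetD (pvY entries) 3 0) "WALL (upper)".toList).insert
                  (PySem.List.pyGetD (pvY entries) 4 0) "ROOF".toList
            else PySem.Dict.empty).getD y ("y=".toList ++ PySem.Int.toChars y))
          y entries))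
      = ((PySem.List.enumerate (pvY entries)).flatMap (fun iy =>
          pvBlock tier_num
            (if (pvY entries).length = 5 then
                PySem.List.pyGetD ["FLOOR".toList, "WALL (lower)".toList, "MIDDLE".toList,
                  "WALL (upper)".toList, "ROOF".toList] iy.1 []
              else "y=".toList ++ PySem.Int.toChars iy.2)
            iy.2 entries)) := by
  have hpw : (pvY entries).Pairwise (fun a b => a < b) := pv_Y_pairwise entries
  obtain ⟨Y, hY⟩ : ∃ Y, pvY entries = Y := ⟨_, rfl⟩
  rw [hY] at hpw ⊢
  by_cases hlen : Y.length = 5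
  · rcases Y with _ | ⟨a, _ | ⟨b, _ | ⟨c, _ | ⟨d, _ | ⟨e, _ | ⟨f, tl⟩⟩⟩⟩⟩⟩ <;>
      simp only [List.length_cons, List.length_nil] at hlen <;> try omega
    simp only [List.pairwise_cons, List.mem_cons, List.mem_singleton, List.not_mem_nil,
      forall_eq_or_imp, forall_eq, List.Pairwise.nil, and_true, IsEmpty.forall_iff] at hpw
    simp only [PySem.List.enumerate_cons, PySem.List.enumerate_nil, List.flatMap_cons,
      List.flatMap_nil, List.append_nil, List.length_cons, List.length_nil]
    have n0 : PySem.List.pyGetD [a,b,c,d,e] (0:Int) 0 = a := by rw [PySem.List.pyGetD_ofNat']; rfl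
    have n1 : PySem.List.pyGetD [a,b,c,d,e] (1:Int) 0 = b := by rw [PySem.List.pyGetD_ofNat']; rfl
    have n2 : PySem.List.pyGetD [a,b,c,d,e] (2:Int) 0 = c := by rw [PySem.List.pyGetD_ofNat']; rfl
    have n3 : PySem.List.pyGetD [a,b,c,d,e] (3:Int) 0 = d := by rw [PySem.List.pyGetD_ofNat']; rfl
    have n4 : PySem.List.pyGetD [a,b,c,d,e] (4:Int) 0 = e := by rw [PySem.List.pyGetD_ofNat']; rfl
    simp only [reduceIte, n0, n1, n2, n3, n4]
    have ga : ∀ (y : Int), y = a → PySem.Dict.getD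
        (((((PySem.Dict.empty.insert a "FLOOR".toList).insert b "WALL (lower)".toList).insert
          c "MIDDLE".toList).insert d "WALL (upper)".toList).insert e "ROOF".toList)
        y ("y=".toList ++ PySem.Int.toChars y) = "FLOOR".toList := by
      intro y hy; subst hy
      simp only [PySem.Dict.getD_insert]; split_ifs <;> first | omega | rfl
    have gb : ∀ (y : Int), y = b → PySem.Dict.getD
        (((((PySem.Dict.empty.insert a "FLOOR".toList).insert b "WALL (lower)".toList).insert
          c "MIDDLE".toList).insert d "WALL (upper)".toList).insert e "ROOF".toList)
        y ("y=".toList ++ PySem.Int.toChars y) = "WALL (lower)".toList := by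
      intro y hy; subst hy
      simp only [PySem.Dict.getD_insert]; split_ifs <;> first | omega | rfl
    have gc : ∀ (y : Int), y = c → PySem.Dict.getD
        (((((PySem.Dict.empty.insert a "FLOOR".toList).insert b "WALL (lower)".toList).insert
          c "MIDDLE".toList).insert d "WALL (upper)".toList).insert e "ROOF".toList)
        y ("y=".toList ++ PySem.Int.toChars y) = "MIDDLE".toList := by
      intro y hy; subst hy
      simp only [PySem.Dict.getD_insert]; split_ifs <;> first | omega | rfl
    have gd : ∀ (y : Int), y = d → PySem.Dict.getD
        (((((PySem.Dict.empty.insert a "FLOOR".toList).insert b "WALL (lower)".toList).insert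
          c "MIDDLE".toList).insert d "WALL (upper)".toList).insert e "ROOF".toList)
        y ("y=".toList ++ PySem.Int.toChars y) = "WALL (upper)".toList := by
      intro y hy; subst hy
      simp only [PySem.Dict.getD_insert]; split_ifs <;> first | omega | rfl
    have ge : ∀ (y : Int), y = e → PySem.Dict.getD
        (((((PySem.Dict.empty.insert a "FLOOR".toList).insert b "WALL (lower)".toList).insert
          c "MIDDLE".toList).insert d "WALL (upper)".toList).insert e "ROOF".toList)
        y ("y=".toList ++ PySem.Int.toChars y) = "ROOF".toList := by
      intro y hy; subst hy
      simp only [PySem.Dict.getD_insert]; split_ifs <;> first | omega | rfl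
    rw [ga a rfl, gb b rfl, gc c rfl, gd d rfl, ge e rfl]
    have m1 : PySem.List.pyGetD ["FLOOR".toList, "WALL (lower)".toList, "MIDDLE".toList,
        "WALL (upper)".toList, "ROOF".toList] (1:Int) [] = "WALL (lower)".toList := rfl
    have m2 : PySem.List.pyGetD ["FLOOR".toList, "WALL (lower)".toList, "MIDDLE".toList,
        "WALL (upper)".toList, "ROOF".toList] (2:Int) [] = "MIDDLE".toList := rfl
    have m3 : PySem.List.pyGetD ["FLOOR".toList, "WALL (lower)".toList, "MIDDLE".toList,
        "WALL (upper)".toList, "ROOF".toList] (3:Int) [] = "WALL (upper)".toList := rfl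
    have m4 : PySem.List.pyGetD ["FLOOR".toList, "WALL (lower)".toList, "MIDDLE".toList,
        "WALL (upper)".toList, "ROOF".toList] (4:Int) [] = "ROOF".toList := rfl
    norm_num
    rw [m1, m2, m3, m4]
  · simp only [if_neg hlen, PySem.Dict.getD_empty]
    exact (pv_flatMap_enumerate_snd (fun y => pvBlock tier_num
      ("y=".toList ++ PySem.Int.toChars y) y entries) Y 0).symm

-- ===== VERDICT (by name: the statement is the Claim_ definition above) =====
theorem format_lua_structure_spec : Claim_equal_format_lua_structure := by
  intro entries tier_num _
  show format_lua_structure entries tier_num = format_lua_structure_alt entries tier_num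
  rw [pv_A_canon, pv_B_canon, pv_final]
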